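-- pv_equiv track=rewrite | github.com/Quantiset/Advent-Of-Code-2023 | day18.py | make_vector
-- ===== SOURCE A (Python) =====
-- def make_vector(char, length):
--     if char == "R":
--         return [(i, 0) for i in range(1, length+1)]
--     if char == "L":
--         return [(-i, 0) for i in range(1, length+1)]
--     if char == "D":
--         return [(0, i) for i in range(1, length+1)]
--     if char == "U":
--         return [(0, -i) for i in range(1, length+1)]
-- ===== SOURCE B (Python) =====
-- def make_vector(char, length):
--     step = {"R": (1, 0), "L": (-1, 0), "D": (0, 1), "U": (0, -1)}.get(char)
--     if step is None:
--         return None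
--     dx, dy = step
--     path = []
--     x = y = 0
--     for _ in range(length):
--         x += dx
--         y += dy
--         path.append((x, y))
--     return path
-- ===== Notes on version B (the rewrite author's own statement) =====
-- stated objective: alternative
-- what changed: Replaces the four index-scaled comprehensions (each point computed as a closed-form multiple of i) by a single running-position walk: an accumulator (x,y) repeatedly advanced by the unit step and appended, with no index arithmetic.
-- outside the precondition, e.g. on make_vector('X', 3): A returns None, B returns None
import Mathlib
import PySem

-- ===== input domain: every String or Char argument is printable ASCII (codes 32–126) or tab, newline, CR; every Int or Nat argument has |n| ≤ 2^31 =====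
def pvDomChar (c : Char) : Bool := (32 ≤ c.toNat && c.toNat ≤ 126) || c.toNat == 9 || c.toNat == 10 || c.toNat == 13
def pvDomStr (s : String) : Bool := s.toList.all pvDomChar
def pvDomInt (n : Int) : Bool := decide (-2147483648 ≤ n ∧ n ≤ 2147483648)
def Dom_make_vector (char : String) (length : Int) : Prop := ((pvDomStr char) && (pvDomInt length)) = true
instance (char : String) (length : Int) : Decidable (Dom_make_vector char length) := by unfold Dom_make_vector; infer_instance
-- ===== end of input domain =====

-- B replaces A's four index-scaled comprehensions by a single running-position walk
-- that repeatedly adds a unit step (objective: alternative).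

-- ===== PORT A =====
def make_vector (char : String) (length : Int) : List (Int × Int) :=
  if char = "R" then (PySem.List.pyRange 1 (length + 1) 1).map (fun i => (i, (0 : Int)))
  else if char = "L" then (PySem.List.pyRange 1 (length + 1) 1).map (fun i => (-i, (0 : Int)))
  else if char = "D" then (PySem.List.pyRange 1 (length + 1) 1).map (fun i => ((0 : Int), i))
  else if char = "U" then (PySem.List.pyRange 1 (length + 1) 1).map (fun i => ((0 : Int), -i))
  else []  -- Python falls through and returns None here; excluded by Pre_make_vector

-- ===== PORT B =====
def mvStep : PySem.Dict String (Int × Int) :=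
  PySem.Dict.ofList [("R", (1, 0)), ("L", (-1, 0)), ("D", (0, 1)), ("U", (0, -1))]

-- the 'for _ in range(length)' walk: advance (x,y) by (dx,dy), append, repeat
def mvWalk (dx dy : Int) : Nat → Int → Int → List (Int × Int)
  | 0, _, _ => []
  | n + 1, x, y => (x + dx, y + dy) :: mvWalk dx dy n (x + dx) (y + dy)

def make_vector_alt (char : String) (length : Int) : List (Int × Int) :=
  match PySem.Dict.get? mvStep char with
  | none => []  -- Python B returns None here; excluded by Pre_make_vector
  | some (dx, dy) => mvWalk dx dy length.toNat 0 0

-- ===== PRECONDITION & SPEC =====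
-- Pre_ excludes unknown direction chars, on which A falls through all branches and
-- returns None, which is not a value of the declared list type (B returns None there too).
def Pre_make_vector (char : String) (length : Int) : Prop :=
  char = "R" ∨ char = "L" ∨ char = "D" ∨ char = "U"
instance (char : String) (length : Int) : Decidable (Pre_make_vector char length) := by
  unfold Pre_make_vector; infer_instance
def pvWitness_make_vector : String × Int := ("R", 3)

def Spec_make_vector (char : String) (length : Int) (out : List (Int × Int)) : Prop := out = make_vector_alt char length
instance (char : String) (length : Int) (out : List (Int × Int)) : Decidable (Spec_make_vector char length out) := by unfold Spec_make_vector; infer_instance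

-- ===== CLAIM (what is proved, stated in full; the proofs are below) =====
def Claim_equal_make_vector : Prop := ∀ (char : String) (length : Int), Dom_make_vector char length → Pre_make_vector char length → Spec_make_vector char length (make_vector char length)

-- ===== LEMMAS AND PROOFS =====
theorem mvWalk_eq_map (dx dy : Int) (n : Nat) (x y : Int) :
    mvWalk dx dy n x y
      = (List.range n).map (fun (k : Nat) => (x + dx * ((k : Int) + 1), y + dy * ((k : Int) + 1))) := by
  induction n generalizing x y with
  | zero => rfl
  | succ n ih =>
    rw [List.range_succ_eq_map, List.map_cons, List.map_map, mvWalk, ih]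
    refine congrArg₂ _ (by simp only [Prod.mk.injEq]; constructor <;> push_cast <;> ring) ?_
    refine List.map_congr_left (fun k _ => ?_)
    simp only [Function.comp, Prod.mk.injEq]
    constructor <;> push_cast <;> ring

theorem mvWalk_len (dx dy : Int) (l : Int) :
    mvWalk dx dy l.toNat 0 0
      = (PySem.List.pyRange 1 (l + 1) 1).map (fun i => (dx * i, dy * i)) := by
  rw [mvWalk_eq_map, PySem.List.pyRange_one, List.map_map]
  have : (l + 1 - 1).toNat = l.toNat := by omega
  rw [this]
  refine List.map_congr_left (fun k _ => ?_)
  simp only [Function.comp, Prod.mk.injEq]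
  constructor <;> ring

-- ===== VERDICT (by name: the statement is the Claim_ definition above) =====
theorem make_vector_spec : Claim_equal_make_vector := by
  intro char length _ hpre
  rcases hpre with h | h | h | h <;> subst h <;>
    simp [Spec_make_vector, make_vector, make_vector_alt, mvStep, mvWalk_len,
      PySem.Dict.get?, PySem.Dict.ofList] <;>
    exact List.map_congr_left (fun i _ => by simp only [Prod.mk.injEq]; constructor <;> ring)
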